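-- pv_equiv track=rewrite | github.com/ccy1991911/ConTester | condition/code/NLP/allennlp.py | no_item_cover_it
-- ===== SOURCE A (Python) =====
-- def get_covered_token_ids(srl_result, k):
--
--     tags = srl_result['verbs'][k]['tags']
--     ids = set()
--     for i in range(0, len(tags)):
--         if tags[i] != 'O':
--             ids.add(i)
--
--     return ids
--
-- def item_1_covers_item_2(srl_result, item_1, item_2):
--
--     item_1_ids = get_covered_token_ids(srl_result, item_1)
--     item_2_ids = get_covered_token_ids(srl_result, item_2)
--
--     flag = True
--     for x in item_2_ids:
--         if x not in item_1_ids: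
--             flag = False
--             break
--
--     return flag
--
-- def no_item_cover_it(srl_result, k):
--
--     flag = True
--
--     for i in range(0, len(srl_result['verbs'])):
--         if i == k:
--             continue
--         if item_1_covers_item_2(srl_result, i, k) == True:
--             flag = False
--             break
--
--     return flag
-- ===== SOURCE B (Python) =====
-- def no_item_cover_it(srl_result, k):
--     all_tags = [v['tags'] for v in srl_result['verbs']]
--     n = len(all_tags)
--     if n == 0:
--         return True
--     cand = list(range(n))
--     for i, t in enumerate(all_tags[k]):
--         if t != 'O':
--             cand = [j for j in cand if i < len(all_tags[j]) and all_tags[j][i] != 'O']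
--     return not [j for j in cand if j != k]
-- ===== Notes on version B (the rewrite author's own statement) =====
-- stated objective: alternative
-- what changed: Replaced A's pairwise helper chain (for each other verb, rebuild k's id-set and test set inclusion with an early break) by a single column-filter sweep: precompute every verb's tag list once, then walk k's tags and repeatedly filter the candidate list of verb indices down to those verbs also active at each of k's active positions, finally dropping k and testing emptiness.
-- outside the precondition, e.g. on no_item_cover_it({'verbs': [{'tags': ['B-V']}, {'tags': ['B-V']}, {}]}, 0): A returns False, B raises KeyError; on no_item_cover_it({'verbs': [{}]}, 0): A returns True, B raises KeyError
import Mathlib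
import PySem

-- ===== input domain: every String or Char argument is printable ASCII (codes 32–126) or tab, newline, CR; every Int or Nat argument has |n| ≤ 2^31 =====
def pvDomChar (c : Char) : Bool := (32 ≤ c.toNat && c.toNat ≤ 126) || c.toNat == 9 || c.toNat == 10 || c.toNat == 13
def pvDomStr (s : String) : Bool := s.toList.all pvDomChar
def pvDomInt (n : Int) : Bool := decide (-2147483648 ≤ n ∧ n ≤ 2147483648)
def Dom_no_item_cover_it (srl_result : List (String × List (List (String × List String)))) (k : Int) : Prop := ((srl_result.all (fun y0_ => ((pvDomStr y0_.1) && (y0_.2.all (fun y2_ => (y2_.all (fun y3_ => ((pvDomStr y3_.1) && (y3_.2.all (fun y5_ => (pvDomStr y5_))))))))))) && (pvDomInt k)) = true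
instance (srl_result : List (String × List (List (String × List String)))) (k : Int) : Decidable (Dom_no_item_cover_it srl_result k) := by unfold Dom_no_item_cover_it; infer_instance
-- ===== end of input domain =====

-- B replaces A's pairwise cover-test helpers by one column-filter sweep over k's active
-- tag positions (objective: alternative decomposition, same asymptotic cost).

-- ===== PORT A =====
-- helper of A: get_covered_token_ids(srl_result, k)
def pvGetCoveredTokenIds (srl_result : List (String × List (List (String × List String)))) (k : Int) : List Int :=
  let verbs := ((PySem.Dict.mk srl_result).get? "verbs").getD []
  let verb := (PySem.List.pyGet? verbs k).getD []
  let tags := ((PySem.Dict.mk verb).get? "tags").getD []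
  (PySem.List.pyRange 0 (tags.length : Int) 1).foldl
    (fun ids i => if PySem.List.pyGetD tags i "" ≠ "O" then PySem.Set.add ids i else ids)
    PySem.Set.empty

-- helper of A: the 'for x in item_2_ids: if x not in item_1_ids: flag=False; break' loop
def pvCoversLoop (ids1 : List Int) : List Int → Bool
  | [] => true
  | x :: rest => if ids1.contains x then pvCoversLoop ids1 rest else false

-- helper of A: item_1_covers_item_2(srl_result, item_1, item_2)
def pvItem1CoversItem2 (srl_result : List (String × List (List (String × List String)))) (item_1 item_2 : Int) : Bool :=
  pvCoversLoop (pvGetCoveredTokenIds srl_result item_1) (pvGetCoveredTokenIds srl_result item_2)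

-- helper of A: the main 'for i in range(0, len(...)): … continue/break' loop
def pvMainLoop (srl_result : List (String × List (List (String × List String)))) (k : Int) : List Int → Bool
  | [] => true
  | i :: rest =>
      if i = k then pvMainLoop srl_result k rest
      else if pvItem1CoversItem2 srl_result i k then false
      else pvMainLoop srl_result k rest

def no_item_cover_it (srl_result : List (String × List (List (String × List String)))) (k : Int) : Bool :=
  let verbs := ((PySem.Dict.mk srl_result).get? "verbs").getD []
  pvMainLoop srl_result k (PySem.List.pyRange 0 (verbs.length : Int) 1)

-- ===== PORT B =====
def no_item_cover_it_alt (srl_result : List (String × List (List (String × List String)))) (k : Int) : Bool :=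
  let allTags := (((PySem.Dict.mk srl_result).get? "verbs").getD []).map
    (fun v => ((PySem.Dict.mk v).get? "tags").getD [])
  let n := allTags.length
  if n = 0 then true
  else
    let tk := (PySem.List.pyGet? allTags k).getD []
    let cand := (PySem.List.enumerate tk).foldl
      (fun cand p =>
        if p.2 ≠ "O" then
          cand.filter (fun j =>
            decide (p.1 < ((PySem.List.pyGetD allTags j []).length : Int)) &&
            decide (PySem.List.pyGetD (PySem.List.pyGetD allTags j []) p.1 "" ≠ "O"))
        else cand)
      (PySem.List.pyRange 0 (n : Int) 1)
    (cand.filter (fun j => j ≠ k)).isEmpty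

-- ===== PRECONDITION & SPEC =====
-- Pre_ = exactly where the Python A returns, except that it also requires EVERY verb to carry a
-- 'tags' key: A reads tags lazily and can return (via its early break, or when no other verb
-- exists) while some unvisited verb lacks 'tags'; B reads all tag lists up front and raises there.
def Pre_no_item_cover_it (srl_result : List (String × List (List (String × List String)))) (k : Int) : Prop :=
  let verbs := ((PySem.Dict.mk srl_result).get? "verbs").getD []
  ((PySem.Dict.mk srl_result).get? "verbs").isSome = true ∧
  (∀ v ∈ verbs, ((PySem.Dict.mk v).get? "tags").isSome = true) ∧
  ((2 ≤ verbs.length ∨ (verbs.length = 1 ∧ k ≠ 0)) → PySem.Raise.InRange verbs.length k)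
instance (srl_result : List (String × List (List (String × List String)))) (k : Int) : Decidable (Pre_no_item_cover_it srl_result k) := by unfold Pre_no_item_cover_it; infer_instance

def pvWitness_no_item_cover_it : (List (String × List (List (String × List String)))) × Int :=
  ([("verbs", [[("tags", ["B-V", "O"])], [("tags", ["O", "B-V"])]])], 0)

def Spec_no_item_cover_it (srl_result : List (String × List (List (String × List String)))) (k : Int) (out : Bool) : Prop := out = no_item_cover_it_alt srl_result k
instance (srl_result : List (String × List (List (String × List String)))) (k : Int) (out : Bool) : Decidable (Spec_no_item_cover_it srl_result k out) := by unfold Spec_no_item_cover_it; infer_instance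

-- ===== CLAIM (what is proved, stated in full; the proofs are below) =====
def Claim_equal_no_item_cover_it : Prop := ∀ (srl_result : List (String × List (List (String × List String)))) (k : Int), Dom_no_item_cover_it srl_result k → Pre_no_item_cover_it srl_result k → Spec_no_item_cover_it srl_result k (no_item_cover_it srl_result k)

-- ===== LEMMAS AND PROOFS =====

-- the 'tags' list of one verb dict (default [] aligns A's and B's totalized lookups)
def tagsOf (v : List (String × List String)) : List String :=
  ((PySem.Dict.mk v).get? "tags").getD []

-- the id-set loop of get_covered_token_ids, as a function of the tags list alone
def idsOf (tags : List String) : List Int :=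
  (PySem.List.pyRange 0 (tags.length : Int) 1).foldl
    (fun ids i => if PySem.List.pyGetD tags i "" ≠ "O" then PySem.Set.add ids i else ids)
    PySem.Set.empty

theorem mem_idsOf (tags : List String) (x : Int) :
    x ∈ idsOf tags ↔ 0 ≤ x ∧ x < (tags.length : Int) ∧ PySem.List.pyGetD tags x "" ≠ "O" := by
  unfold idsOf
  rw [PySem.List.foldl_ite_eq_foldl_filter]
  rw [PySem.Set.mem_foldl_add (f := fun (b : Int) => b)]
  simp [PySem.List.mem_pyRange_one, PySem.Set.empty]
  tauto

theorem pyGetD_map_tagsOf (verbs : List (List (String × List String))) (i : Int) :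
    PySem.List.pyGetD (verbs.map tagsOf) i [] = tagsOf ((PySem.List.pyGet? verbs i).getD []) := by
  simp only [PySem.List.pyGetD, PySem.List.pyGet?, List.length_map, List.getElem?_map]
  cases hx : PySem.List.pyIdx? verbs.length i with
  | none => simp only [Option.bind_none, Option.getD_none, tagsOf]; rfl
  | some a =>
      cases hg : verbs[a]? with
      | none =>
          simp only [Option.bind_some, hg, Option.map_none, Option.getD_none, tagsOf]; rfl
      | some v =>
          simp only [Option.bind_some, hg, Option.map_some, Option.getD_some, tagsOf]

theorem pvGetCoveredTokenIds_eq (srl_result : List (String × List (List (String × List String)))) (i : Int) :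
    pvGetCoveredTokenIds srl_result i
      = idsOf (PySem.List.pyGetD ((((PySem.Dict.mk srl_result).get? "verbs").getD []).map tagsOf) i []) := by
  rw [pyGetD_map_tagsOf]
  rfl

theorem pvCoversLoop_eq_true (ids1 l : List Int) :
    pvCoversLoop ids1 l = true ↔ ∀ x ∈ l, x ∈ ids1 := by
  induction l with
  | nil => simp [pvCoversLoop]
  | cons x rest ih =>
      simp only [pvCoversLoop]
      by_cases hx : ids1.contains x <;> simp_all

theorem pvMainLoop_eq_true (srl_result : List (String × List (List (String × List String)))) (k : Int) (l : List Int) :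
    pvMainLoop srl_result k l = true ↔ ∀ i ∈ l, i ≠ k → pvItem1CoversItem2 srl_result i k = false := by
  induction l with
  | nil => simp [pvMainLoop]
  | cons i rest ih =>
      simp only [pvMainLoop]
      by_cases hik : i = k
      · simp [hik, ih]
      · by_cases hc : pvItem1CoversItem2 srl_result i k <;> simp_all

theorem foldl_filter_all {α β : Type} (l : List α) (q : α → Prop) [DecidablePred q]
    (g : α → β → Bool) (c0 : List β) :
    l.foldl (fun c p => if q p then c.filter (g p) else c) c0
      = c0.filter (fun j => l.all (fun p => !decide (q p) || g p j)) := by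
  induction l generalizing c0 with
  | nil => simp
  | cons a l ih =>
      simp only [List.foldl_cons, List.all_cons]
      rw [ih]
      by_cases ha : q a
      · simp only [if_pos ha, List.filter_filter]
        apply List.filter_congr
        intro j _
        simp [ha, Bool.and_comm]
      · simp [ha]

theorem pyGetD_eq_getD_pyGet? {α : Type} (xs : List α) (i : Int) (d : α) :
    PySem.List.pyGetD xs i d = (PySem.List.pyGet? xs i).getD d := rfl

-- A's subset test between two id-sets ↔ B's per-position condition over enumerate
theorem covers_iff_enum (tj tk : List String) :
    pvCoversLoop (idsOf tj) (idsOf tk) = true ↔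
      ∀ p ∈ PySem.List.enumerate tk, p.2 ≠ "O" →
        (p.1 < (tj.length : Int) ∧ PySem.List.pyGetD tj p.1 "" ≠ "O") := by
  rw [pvCoversLoop_eq_true]
  constructor
  · intro h p hp hne
    obtain ⟨m, hm, rfl⟩ := (PySem.List.mem_enumerate_iff tk 0 p).mp hp
    have hmem : ((0 : Int) + m) ∈ idsOf tk := by
      rw [mem_idsOf]
      refine ⟨by omega, by omega, ?_⟩
      rw [show ((0 : Int) + m) = (m : Int) by omega, PySem.List.pyGetD_natCast]
      simpa [List.getD, hm] using hne
    have := (mem_idsOf tj _).mp (h _ hmem)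
    exact ⟨this.2.1, this.2.2⟩
  · intro h x hx
    rw [mem_idsOf] at hx
    obtain ⟨hx0, hxlen, hxO⟩ := hx
    have hxt : x.toNat < tk.length := by omega
    have hp : ((0 : Int) + x.toNat, tk[x.toNat]) ∈ PySem.List.enumerate tk :=
      (PySem.List.mem_enumerate_iff tk 0 _).mpr ⟨x.toNat, hxt, rfl⟩
    have hxe : ((0 : Int) + x.toNat) = x := by omega
    have hne : tk[x.toNat] ≠ "O" := by
      rw [← hxe] at hxO
      rw [show ((0 : Int) + x.toNat) = (x.toNat : Int) by omega, PySem.List.pyGetD_natCast] at hxO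
      simpa [List.getD, hxt] using hxO
    have := h _ hp hne
    rw [hxe] at this
    exact (mem_idsOf tj x).mpr ⟨hx0, this.1, this.2⟩

-- ===== VERDICT (by name: the statement is the Claim_ definition above) =====
theorem no_item_cover_it_spec : Claim_equal_no_item_cover_it := by
  intro srl_result k _ _
  unfold Spec_no_item_cover_it no_item_cover_it no_item_cover_it_alt
  simp only []
  set V : List (List (String × List String)) := ((PySem.Dict.mk srl_result).get? "verbs").getD [] with hV
  have hmapf : (fun v => ((PySem.Dict.mk v).get? "tags").getD []) = tagsOf := rfl
  rw [hmapf]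
  by_cases hn : (V.map tagsOf).length = 0
  · have hV0 : V.length = 0 := by simpa using hn
    simp [hn, hV0, PySem.List.pyRange_one_eq_nil, pvMainLoop]
  · rw [if_neg hn]
    simp only [← pyGetD_eq_getD_pyGet?]
    rw [foldl_filter_all (q := fun p : Int × String => p.2 ≠ "O")]
    rw [Bool.eq_iff_iff]
    rw [pvMainLoop_eq_true, List.isEmpty_iff, List.filter_eq_nil_iff]
    have hlen : (V.map tagsOf).length = V.length := List.length_map _
    constructor
    · intro h j hj
      simp only [List.mem_filter, PySem.List.mem_pyRange_one, List.all_eq_true] at hj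
      obtain ⟨⟨hj0, hjn⟩, hall⟩ := hj
      simp only [ne_eq, decide_not]
      by_contra hjk
      have hjk' : j ≠ k := by simpa using hjk
      have := h j (by rw [PySem.List.mem_pyRange_one]; omega) hjk'
      rw [pvItem1CoversItem2, pvGetCoveredTokenIds_eq, pvGetCoveredTokenIds_eq] at this
      rw [← hV] at this
      rw [Bool.eq_false_iff, Ne, covers_iff_enum] at this
      apply this
      intro p hp hne
      have := hall p hp
      simp only [Bool.or_eq_true, Bool.not_eq_true', decide_eq_false_iff_not, decide_eq_true_eq,
        Bool.and_eq_true, not_not] at this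
      rcases this with h1 | h2
      · exact absurd h1 hne
      · exact ⟨h2.1, h2.2⟩
    · intro h i hi hik
      rw [PySem.List.mem_pyRange_one] at hi
      rw [pvItem1CoversItem2, pvGetCoveredTokenIds_eq, pvGetCoveredTokenIds_eq, ← hV]
      rw [Bool.eq_false_iff, Ne, covers_iff_enum]
      intro hcov
      refine (h i ?_) (decide_eq_true hik)
      simp only [List.mem_filter, PySem.List.mem_pyRange_one, List.all_eq_true]
      refine ⟨⟨hi.1, by omega⟩, ?_⟩
      intro p hp
      by_cases hpo : p.2 = "O"
      · simp [hpo]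
      · have := hcov p hp hpo
        simp only [Bool.or_eq_true, Bool.and_eq_true, decide_eq_true_eq]
        right
        exact ⟨this.1, by simpa using this.2⟩
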